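-- pv_equiv track=rewrite | github.com/xpucko/Software-University-SoftUni | advanced/topics/multidimensional_lists_exercise/knight_game.py | get_count_deleted_knights
-- ===== SOURCE A (Python) =====
-- def get_damage(row_count, column_count, matrix):
--     counter = 0
--     if row_count - 2 >= 0 and column_count - 1 >= 0:
--         if matrix[row_count - 2][column_count - 1] == 'K':
--             counter += 1
--     if row_count - 2 >= 0 and column_count + 1 < len(matrix):
--         if matrix[row_count - 2][column_count + 1] == 'K':
--             counter += 1
--     if row_count - 1 >= 0 and column_count - 2 >= 0:
--         if matrix[row_count - 1][column_count - 2] == 'K':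
--             counter += 1
--     if row_count - 1 >= 0 and column_count + 2 < len(matrix):
--         if matrix[row_count - 1][column_count + 2] == 'K':
--             counter += 1
--     if row_count + 1 < len(matrix) and column_count - 2 >= 0:
--         if matrix[row_count + 1][column_count - 2] == 'K':
--             counter += 1
--     if row_count + 1 < len(matrix) and column_count + 2 < len(matrix):
--         if matrix[row_count + 1][column_count + 2] == 'K':
--             counter += 1
--     if row_count + 2 < len(matrix) and column_count - 1 >= 0:
--         if matrix[row_count + 2][column_count - 1] == 'K':
--             counter += 1
--     if row_count + 2 < len(matrix) and column_count + 1 < len(matrix):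
--         if matrix[row_count + 2][column_count + 1] == 'K':
--             counter += 1
--     return counter
--
-- def get_count_deleted_knights(matrix):
--     position = []
--     deleted_knights = 0
--
--     while True:
--         max_damage = 0
--         for row_index in range(len(matrix)):
--             for column_index in range(len(matrix)):
--                 current = matrix[row_index][column_index]
--                 if current == 'K':
--                     damage = get_damage(row_index, column_index, matrix)
--                     if damage > max_damage:
--                         max_damage = damage
--                         position = [row_index, column_index]
--
--         if max_damage == 0:
--             break
--         row = position[0]
--         column = position[1]
--         matrix[row][column] = '0'
--         position = []
--         deleted_knights += 1
--
--     return deleted_knights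
-- ===== SOURCE B (Python) =====
-- def get_count_deleted_knights(matrix):
--     n = len(matrix)
--     offsets = ((-2, -1), (-2, 1), (-1, -2), (-1, 2), (1, -2), (1, 2), (2, -1), (2, 1))
--     knights = [(r, c) for r in range(n) for c in range(n) if matrix[r][c] == 'K']
--     kset = set(knights)
--     deg = {(r, c): sum((r + dr, c + dc) in kset for dr, dc in offsets)
--            for (r, c) in knights}
--     deleted = 0
--     while deg:
--         (r, c), d = max(deg.items(), key=lambda kv: kv[1])
--         if d == 0:
--             break
--         del deg[(r, c)]
--         for dr, dc in offsets:
--             if (r + dr, c + dc) in deg: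
--                 deg[(r + dr, c + dc)] -= 1
--         deleted += 1
--     return deleted
-- ===== Notes on version B (the rewrite author's own statement) =====
-- stated objective: alternative
-- what changed: A rescans the whole board and recomputes every knight's attack count with bounds-checked indexing on every deletion round; B computes an attack-degree table once, each round takes max() over that table and, after deleting the chosen knight, merely decrements the degrees of its at most 8 knight-move neighbours, never reading the board again (B also does not mutate the matrix; the equivalence is about the return value).
import Mathlib
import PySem

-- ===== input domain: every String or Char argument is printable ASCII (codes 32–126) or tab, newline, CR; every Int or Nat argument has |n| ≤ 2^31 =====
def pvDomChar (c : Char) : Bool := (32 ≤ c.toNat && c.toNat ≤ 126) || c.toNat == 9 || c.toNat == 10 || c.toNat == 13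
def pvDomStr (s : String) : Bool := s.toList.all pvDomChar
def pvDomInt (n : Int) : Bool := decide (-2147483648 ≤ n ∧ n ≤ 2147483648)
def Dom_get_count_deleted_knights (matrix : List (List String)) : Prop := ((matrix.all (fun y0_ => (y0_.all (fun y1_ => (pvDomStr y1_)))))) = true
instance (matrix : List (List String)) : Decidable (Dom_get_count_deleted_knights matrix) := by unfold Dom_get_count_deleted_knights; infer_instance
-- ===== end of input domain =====

-- B computes every knight's attack degree once, then each round takes the maximum of that
-- table and decrements the degrees of the removed knight's ≤ 8 neighbours, instead of A's
-- full-board rescan recomputing all damages every round (objective: alternative).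
-- NOTE: Python A mutates its argument in place (deleted knights become '0'); B does not.
-- The equivalence proved here is about the RETURN value only.

-- ===== PORT A =====
-- matrix[r][c] (both Pythons read cells only at indices that are in range under Pre_)
def pvCell (matrix : List (List String)) (r c : Int) : String :=
  PySem.List.pyGetD (PySem.List.pyGetD matrix r []) c ""

def get_damage (row_count column_count : Int) (matrix : List (List String)) : Int :=
  let n : Int := PySem.List.len matrix
  let c0 : Int := 0
  let c1 := if row_count - 2 ≥ 0 ∧ column_count - 1 ≥ 0 then
      (if pvCell matrix (row_count - 2) (column_count - 1) == "K" then c0 + 1 else c0) else c0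
  let c2 := if row_count - 2 ≥ 0 ∧ column_count + 1 < n then
      (if pvCell matrix (row_count - 2) (column_count + 1) == "K" then c1 + 1 else c1) else c1
  let c3 := if row_count - 1 ≥ 0 ∧ column_count - 2 ≥ 0 then
      (if pvCell matrix (row_count - 1) (column_count - 2) == "K" then c2 + 1 else c2) else c2
  let c4 := if row_count - 1 ≥ 0 ∧ column_count + 2 < n then
      (if pvCell matrix (row_count - 1) (column_count + 2) == "K" then c3 + 1 else c3) else c3
  let c5 := if row_count + 1 < n ∧ column_count - 2 ≥ 0 then
      (if pvCell matrix (row_count + 1) (column_count - 2) == "K" then c4 + 1 else c4) else c4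
  let c6 := if row_count + 1 < n ∧ column_count + 2 < n then
      (if pvCell matrix (row_count + 1) (column_count + 2) == "K" then c5 + 1 else c5) else c5
  let c7 := if row_count + 2 < n ∧ column_count - 1 ≥ 0 then
      (if pvCell matrix (row_count + 2) (column_count - 1) == "K" then c6 + 1 else c6) else c6
  let c8 := if row_count + 2 < n ∧ column_count + 1 < n then
      (if pvCell matrix (row_count + 2) (column_count + 1) == "K" then c7 + 1 else c7) else c7
  c8

-- the double 'for' scan of one while-iteration of A
def pvScanA (matrix : List (List String)) (position : List Int) : Int × List Int :=
  let n : Int := PySem.List.len matrix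
  (PySem.List.pyRange 0 n 1).foldl (fun st row_index =>
    (PySem.List.pyRange 0 n 1).foldl (fun st column_index =>
      if pvCell matrix row_index column_index == "K" then
        (let damage := get_damage row_index column_index matrix
         if damage > st.1 then (damage, [row_index, column_index]) else st)
      else st) st) (0, position)

-- A's 'while True' loop; fuel is a totality guard only (each non-final round deletes a knight)
def pvLoopA (fuel : Nat) (matrix : List (List String)) (position : List Int) (deleted : Int) : Int :=
  match fuel with
  | 0 => deleted
  | fuel + 1 =>
    let scan := pvScanA matrix position
    if scan.1 == 0 then deleted
    else
      let row := PySem.List.pyGetD scan.2 0 0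
      let column := PySem.List.pyGetD scan.2 1 0
      let matrix' := PySem.List.pySetD matrix row
        (PySem.List.pySetD (PySem.List.pyGetD matrix row []) column "0")
      pvLoopA fuel matrix' [] (deleted + 1)

def get_count_deleted_knights (matrix : List (List String)) : Int :=
  pvLoopA (matrix.length * matrix.length + 1) matrix [] 0

-- ===== PORT B =====
def pvOffsets : List (Int × Int) :=
  [(-2, -1), (-2, 1), (-1, -2), (-1, 2), (1, -2), (1, 2), (2, -1), (2, 1)]

-- [(r, c) for r in range(n) for c in range(n) if matrix[r][c] == 'K']
def pvKnights (matrix : List (List String)) : List (Int × Int) :=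
  let n : Int := PySem.List.len matrix
  (PySem.List.pyRange 0 n 1).flatMap (fun r =>
    ((PySem.List.pyRange 0 n 1).filter (fun c => pvCell matrix r c == "K")).map (fun c => (r, c)))

-- sum((r + dr, c + dc) in kset for dr, dc in offsets)
def pvSumDmg (kset : PySem.Set (Int × Int)) (r c : Int) : Int :=
  pvOffsets.foldl (fun s o =>
    s + (if PySem.Set.contains kset (r + o.1, c + o.2) then 1 else 0)) 0

-- 'for dr, dc in offsets: if (r + dr, c + dc) in deg: deg[(r + dr, c + dc)] -= 1'
def pvDecr (deg : PySem.Dict (Int × Int) Int) (r c : Int) : PySem.Dict (Int × Int) Int :=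
  pvOffsets.foldl (fun d o =>
    if d.contains (r + o.1, c + o.2) then
      d.insert (r + o.1, c + o.2) (d.getD (r + o.1, c + o.2) 0 - 1)
    else d) deg

-- B's 'while deg' loop; fuel is a totality guard only
def pvLoopB (fuel : Nat) (deg : PySem.Dict (Int × Int) Int) (deleted : Int) : Int :=
  match fuel with
  | 0 => deleted
  | fuel + 1 =>
    match PySem.List.max? deg.items (fun kv => kv.2) with
    | none => deleted        -- empty dict: 'while deg' exits
    | some m =>
      if m.2 == 0 then deleted
      else pvLoopB fuel (pvDecr (deg.erase m.1) m.1.1 m.1.2) (deleted + 1)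

def get_count_deleted_knights_alt (matrix : List (List String)) : Int :=
  let knights := pvKnights matrix
  let kset : PySem.Set (Int × Int) := PySem.Set.ofList knights
  let deg := knights.foldl
    (fun d p => d.insert p (pvSumDmg kset p.1 p.2)) PySem.Dict.empty
  pvLoopB (matrix.length * matrix.length + 1) deg 0

-- ===== PRECONDITION & SPEC =====
-- Pre_ excludes exactly the matrices with a row shorter than len(matrix): there Python A
-- (and B) raises IndexError while scanning the board.
def Pre_get_count_deleted_knights (matrix : List (List String)) : Prop :=
  ∀ row ∈ matrix, matrix.length ≤ row.length
instance (matrix : List (List String)) : Decidable (Pre_get_count_deleted_knights matrix) := by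
  unfold Pre_get_count_deleted_knights; infer_instance

def pvWitness_get_count_deleted_knights : List (List String) :=
  [["K", "0", "K"], ["0", "K", "0"], ["K", "0", "0"]]

def Spec_get_count_deleted_knights (matrix : List (List String)) (out : Int) : Prop := out = get_count_deleted_knights_alt matrix
instance (matrix : List (List String)) (out : Int) : Decidable (Spec_get_count_deleted_knights matrix out) := by unfold Spec_get_count_deleted_knights; infer_instance

-- ===== CLAIM (what is proved, stated in full; the proofs are below) =====
def Claim_equal_get_count_deleted_knights : Prop := ∀ (matrix : List (List String)), Dom_get_count_deleted_knights matrix → Pre_get_count_deleted_knights matrix → Spec_get_count_deleted_knights matrix (get_count_deleted_knights matrix)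

-- ===== LEMMAS AND PROOFS =====

-- all board coordinates, row-major
def pvPairs (n : Int) : List (Int × Int) :=
  (PySem.List.pyRange 0 n 1).flatMap (fun r => (PySem.List.pyRange 0 n 1).map (fun c => (r, c)))

lemma pvPairs_nodup (n : Int) : (pvPairs n).Nodup := by
  unfold pvPairs
  apply List.nodup_flatMap.mpr
  refine ⟨?_, ?_⟩
  · intro r _
    exact (PySem.List.nodup_pyRange_one 0 n).map (by intro x y h; simpa using h)
  · apply List.Pairwise.imp ?_ (PySem.List.pairwise_lt_pyRange_one 0 n)
    intro x y hxy
    simp only [List.disjoint_left, List.mem_map]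
    rintro p ⟨c, _, rfl⟩ ⟨d, _, h⟩
    exact absurd (congrArg Prod.fst h).symm (by simp; omega)

lemma mem_pvPairs (n : Int) (q : Int × Int) :
    q ∈ pvPairs n ↔ 0 ≤ q.1 ∧ q.1 < n ∧ 0 ≤ q.2 ∧ q.2 < n := by
  obtain ⟨a, b⟩ := q
  unfold pvPairs
  simp only [List.mem_flatMap, PySem.List.mem_pyRange_one, List.mem_map, Prod.ext_iff,
    exists_eq_right_right]
  tauto

lemma pvKnights_eq_filter (matrix : List (List String)) :
    pvKnights matrix =
      (pvPairs (matrix.length : Int)).filter (fun p => pvCell matrix p.1 p.2 == "K") := by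
  unfold pvKnights pvPairs
  simp only [PySem.List.len_eq, List.filter_flatMap, List.filter_map]
  rfl

lemma mem_pvKnights (matrix : List (List String)) (q : Int × Int) :
    q ∈ pvKnights matrix ↔
      0 ≤ q.1 ∧ q.1 < (matrix.length : Int) ∧ 0 ≤ q.2 ∧ q.2 < (matrix.length : Int) ∧
        pvCell matrix q.1 q.2 = "K" := by
  rw [pvKnights_eq_filter, List.mem_filter, mem_pvPairs, beq_iff_eq]
  tauto

lemma pvKnights_nodup (matrix : List (List String)) : (pvKnights matrix).Nodup := by
  rw [pvKnights_eq_filter]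
  exact (pvPairs_nodup _).filter _

lemma contains_pvKnights (matrix : List (List String)) (x y : Int) :
    (PySem.Set.contains (pvKnights matrix) (x, y) = true) ↔
      (0 ≤ x ∧ x < (matrix.length : Int) ∧ 0 ≤ y ∧ y < (matrix.length : Int) ∧
        pvCell matrix x y = "K") := by
  rw [PySem.Set.contains_iff, mem_pvKnights]

lemma pv_step (P : Prop) [Decidable P] (Q b : Bool) (x y : Int)
    (h : (P ∧ Q = true) ↔ b = true) (hxy : x = y) :
    (if P then (if Q = true then x + 1 else x) else x) = y + (if b then 1 else 0) := by
  subst hxy; split_ifs <;> simp_all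

lemma pv_damage_eq (matrix : List (List String)) (r c : Int)
    (hr0 : 0 ≤ r) (hr1 : r < (matrix.length : Int))
    (hc0 : 0 ≤ c) (hc1 : c < (matrix.length : Int)) :
    get_damage r c matrix = pvSumDmg (pvKnights matrix) r c := by
  unfold get_damage pvSumDmg
  simp only [pvOffsets, List.foldl, PySem.List.len_eq, ← Int.sub_eq_add_neg]
  refine pv_step _ _ _ _ _ ?_ (pv_step _ _ _ _ _ ?_ (pv_step _ _ _ _ _ ?_ (pv_step _ _ _ _ _ ?_
    (pv_step _ _ _ _ _ ?_ (pv_step _ _ _ _ _ ?_ (pv_step _ _ _ _ _ ?_ (pv_step _ _ _ _ _ ?_ rfl)))))))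
  all_goals {
    rw [contains_pvKnights, beq_iff_eq]
    constructor
    · rintro ⟨hg, hq⟩
      exact ⟨by omega, by omega, by omega, by omega, hq⟩
    · rintro ⟨h1, h2, h3, h4, hq⟩
      exact ⟨⟨by omega, by omega⟩, hq⟩ }

def pvStepF (matrix : List (List String)) (st : Int × List Int) (q : Int × Int) : Int × List Int :=
  let damage := get_damage q.1 q.2 matrix
  if damage > st.1 then (damage, [q.1, q.2]) else st

lemma pv_scanA_eq_foldl (matrix : List (List String)) (pos : List Int) :
    pvScanA matrix pos = (pvKnights matrix).foldl (pvStepF matrix) (0, pos) := by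
  symm
  rw [pvKnights_eq_filter, ← PySem.List.foldl_if_eq_foldl_filter]
  unfold pvPairs
  rw [List.foldl_flatMap]
  simp only [List.foldl_map]
  rfl

-- ---- selection: A's first-strict-improvement scan = B's max() (first extremal) ----
def pvSelInv (pos0 : List Int) (K0 : List (Int × Int)) (f : (Int × Int) → Int)
    (a : Int × List Int) (b : Option ((Int × Int) × Int)) : Prop :=
  match b with
  | none => a = (0, pos0)
  | some m => m.1 ∈ K0 ∧ m.2 = f m.1 ∧ a.1 = m.2 ∧ 0 ≤ m.2 ∧
      (0 < m.2 → a.2 = [m.1.1, m.1.2]) ∧ (m.2 = 0 → a.2 = pos0)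

lemma pv_sel_rel (pos0 : List Int) (K0 : List (Int × Int)) (f : (Int × Int) → Int)
    (hf : ∀ p ∈ K0, 0 ≤ f p) :
    ∀ (K : List (Int × Int)), (∀ p ∈ K, p ∈ K0) → ∀ a b, pvSelInv pos0 K0 f a b →
      pvSelInv pos0 K0 f
        (K.foldl (fun st p => if f p > st.1 then (f p, [p.1, p.2]) else st) a)
        (K.foldl (fun acc p => match acc with
          | none => some (p, f p)
          | some m => if m.2 < f p then some (p, f p) else some m) b) := by
  intro K
  induction K with
  | nil => intro _ a b h; exact h
  | cons q t ih =>
    intro hK a b hab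
    simp only [List.foldl_cons]
    apply ih (fun p hp => hK p (List.mem_cons_of_mem q hp))
    have hqK : q ∈ K0 := hK q List.mem_cons_self
    have hfq : 0 ≤ f q := hf q hqK
    rcases b with _ | m
    · have hab' : a = (0, pos0) := hab
      subst hab'
      dsimp only
      split_ifs with h0
      · exact ⟨hqK, rfl, rfl, by omega, fun _ => rfl, fun h => absurd h (by omega)⟩
      · exact ⟨hqK, rfl, by omega, hfq, fun h => absurd h (by omega), fun _ => rfl⟩
    · obtain ⟨h1, h2, h3, h4, h5, h6⟩ := hab
      dsimp only
      by_cases hlt : m.2 < f q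
      · rw [if_pos hlt, if_pos (show f q > a.1 by omega)]
        exact ⟨hqK, rfl, rfl, by omega, fun _ => rfl, fun h => absurd h (by omega)⟩
      · rw [if_neg hlt, if_neg (show ¬ f q > a.1 by omega)]
        exact ⟨h1, h2, h3, h4, h5, h6⟩

-- ---- the degree dict as an association list over the knight list ----
lemma pv_keys_map (K : List (Int × Int)) (f : (Int × Int) → Int) :
    (PySem.Dict.mk (K.map (fun x => (x, f x)))).keys = K := by
  simp [PySem.Dict.keys, List.map_map, Function.comp_def]

lemma pv_contains_map (K : List (Int × Int)) (f : (Int × Int) → Int) (t : Int × Int) :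
    (PySem.Dict.mk (K.map (fun x => (x, f x)))).contains t = decide (t ∈ K) := by
  simp only [PySem.Dict.contains, List.any_map, Function.comp_def]
  rw [List.any_beq']
  simp

lemma pv_getD_map (K : List (Int × Int)) (hnd : K.Nodup) (f : (Int × Int) → Int)
    (t : Int × Int) (ht : t ∈ K) :
    (PySem.Dict.mk (K.map (fun x => (x, f x)))).getD t 0 = f t := by
  exact PySem.Dict.getD_of_mem_items _ (List.mem_map_of_mem (f := fun x => (x, f x)) ht)
    (by rw [pv_keys_map]; exact hnd) 0

lemma pv_erase_map (K : List (Int × Int)) (hnd : K.Nodup) (f : (Int × Int) → Int)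
    (q : Int × Int) :
    (PySem.Dict.mk (K.map (fun x => (x, f x)))).erase q =
      PySem.Dict.mk ((K.erase q).map (fun x => (x, f x))) := by
  show PySem.Dict.mk ((K.map (fun x => (x, f x))).filter _) = _
  rw [List.filter_map, hnd.erase_eq_filter]
  congr 1

def pvInd (x y : Int × Int) : Int := if x == y then 1 else 0

-- the decrement loop on a map-form dict decrements each key once per matching offset
lemma pv_dec_fold (os : List (Int × Int)) (K : List (Int × Int)) (hnd : K.Nodup)
    (f : (Int × Int) → Int) (r c : Int) :
    os.foldl (fun d o =>
        if d.contains (r + o.1, c + o.2) then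
          d.insert (r + o.1, c + o.2) (d.getD (r + o.1, c + o.2) 0 - 1)
        else d) (PySem.Dict.mk (K.map (fun x => (x, f x))))
      = PySem.Dict.mk (K.map (fun x =>
          (x, f x - (os.map (fun o => pvInd (r + o.1, c + o.2) x)).sum))) := by
  induction os generalizing f with
  | nil => simp
  | cons o os ih =>
    simp only [List.foldl_cons, List.map_cons, List.sum_cons]
    by_cases ht : (r + o.1, c + o.2) ∈ K
    · have hc : (PySem.Dict.mk (K.map (fun x => (x, f x)))).contains (r + o.1, c + o.2)
          = true := by
        rw [pv_contains_map]; simpa using ht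
      rw [if_pos hc]
      have hins : (PySem.Dict.mk (K.map (fun x => (x, f x)))).insert (r + o.1, c + o.2)
          ((PySem.Dict.mk (K.map (fun x => (x, f x)))).getD (r + o.1, c + o.2) 0 - 1)
          = PySem.Dict.mk (K.map (fun x =>
              (x, if x = (r + o.1, c + o.2) then f x - 1 else f x))) := by
        rw [pv_getD_map K hnd f _ ht]
        rw [PySem.Dict.insert, if_pos hc]
        congr 1
        show (K.map (fun x => (x, f x))).map _ = _
        rw [List.map_map]
        apply List.map_congr_left
        intro x _
        by_cases hx : x = (r + o.1, c + o.2) <;> simp [hx]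
      rw [hins, ih _]
      congr 1
      apply List.map_congr_left
      intro x _
      by_cases hx : x = (r + o.1, c + o.2)
      · subst hx
        rw [if_pos rfl]
        have h1 : pvInd (r + o.1, c + o.2) (r + o.1, c + o.2) = 1 := by simp [pvInd]
        rw [h1, Prod.mk.injEq]
        exact ⟨rfl, by ring⟩
      · have h0 : pvInd (r + o.1, c + o.2) x = 0 := by
          have hne : ¬ ((r + o.1, c + o.2) = x) := fun h => hx h.symm
          simp [pvInd, beq_iff_eq, hne]
        rw [if_neg hx, h0, Prod.mk.injEq]
        exact ⟨rfl, by ring⟩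
    · have hc : (PySem.Dict.mk (K.map (fun x => (x, f x)))).contains (r + o.1, c + o.2)
          = false := by
        rw [pv_contains_map]; simpa using ht
      rw [if_neg (by simp [hc])]
      rw [ih f]
      congr 1
      apply List.map_congr_left
      intro x hx
      have h0 : pvInd (r + o.1, c + o.2) x = 0 := by
        have hne : ¬ ((r + o.1, c + o.2) = x) := fun h => ht (h ▸ hx)
        simp [pvInd, beq_iff_eq, hne]
      rw [h0, Prod.mk.injEq]
      exact ⟨rfl, by ring⟩

-- removing knight q lowers each remaining knight's degree by its q-attack indicator
lemma pv_sum_erase (K : List (Int × Int)) (hnd : K.Nodup) (q : Int × Int) (hq : q ∈ K)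
    (a b : Int) :
    pvSumDmg K a b
      = pvSumDmg (K.erase q) a b
        + (pvOffsets.map (fun o => pvInd (a + o.1, b + o.2) q)).sum := by
  unfold pvSumDmg
  rw [PySem.List.foldl_add pvOffsets (fun o : Int × Int =>
      if PySem.Set.contains K (a + o.1, b + o.2) then (1 : Int) else 0) 0,
    PySem.List.foldl_add pvOffsets (fun o : Int × Int =>
      if PySem.Set.contains (K.erase q) (a + o.1, b + o.2) then (1 : Int) else 0) 0]
  have hterm : ∀ t : Int × Int,
      (if PySem.Set.contains K t then (1 : Int) else 0)
        = (if PySem.Set.contains (K.erase q) t then (1 : Int) else 0) + pvInd t q := by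
    intro t
    by_cases htq : t = q
    · subst htq
      have h1 : PySem.Set.contains (K.erase t) t = false := by
        rw [Bool.eq_false_iff]
        intro hc
        exact absurd (hnd.mem_erase_iff.mp ((PySem.Set.contains_iff _ _).mp hc)).1 (by simp)
      have h2 : PySem.Set.contains K t = true := (PySem.Set.contains_iff _ _).mpr hq
      rw [h1, h2]
      simp [pvInd]
    · have h1 : PySem.Set.contains (K.erase q) t = PySem.Set.contains K t := by
        by_cases hm : t ∈ K
        · rw [(PySem.Set.contains_iff _ _).mpr (hnd.mem_erase_iff.mpr ⟨htq, hm⟩),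
            (PySem.Set.contains_iff _ _).mpr hm]
        · have hA : PySem.Set.contains (K.erase q) t = false := by
            rw [Bool.eq_false_iff]
            intro hc
            exact hm (hnd.mem_erase_iff.mp ((PySem.Set.contains_iff _ _).mp hc)).2
          have hB : PySem.Set.contains K t = false := by
            rw [Bool.eq_false_iff]
            intro hc
            exact hm ((PySem.Set.contains_iff _ _).mp hc)
          rw [hA, hB]
      have h2 : pvInd t q = 0 := by simp [pvInd, beq_iff_eq, htq]
      rw [h1, h2, add_zero]
  have hfun : pvOffsets.map (fun o : Int × Int =>
        if PySem.Set.contains K (a + o.1, b + o.2) then (1 : Int) else 0)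
      = pvOffsets.map (fun o : Int × Int =>
          (if PySem.Set.contains (K.erase q) (a + o.1, b + o.2) then (1 : Int) else 0)
            + pvInd (a + o.1, b + o.2) q) :=
    List.map_congr_left (fun o _ => hterm (a + o.1, b + o.2))
  rw [hfun, PySem.List.sum_map_add_int]
  ring

-- a knight attacks exactly the knights that attack it (the offset list is symmetric)
lemma pv_cnt_symm (p q : Int × Int) :
    (pvOffsets.map (fun o => pvInd (p.1 + o.1, p.2 + o.2) q)).sum
      = (pvOffsets.map (fun o => pvInd (q.1 + o.1, q.2 + o.2) p)).sum := by
  obtain ⟨p1, p2⟩ := p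
  obtain ⟨q1, q2⟩ := q
  have key : ∀ a b a' b' : Int, a + a' = 0 → b + b' = 0 →
      pvInd (p1 + a, p2 + b) (q1, q2) = pvInd (q1 + a', q2 + b') (p1, p2) := by
    intro a b a' b' ha hb
    simp only [pvInd, beq_iff_eq]
    exact if_congr (by simp only [Prod.mk.injEq]; omega) rfl rfl
  simp only [pvOffsets, List.map_cons, List.map_nil, List.sum_cons, List.sum_nil]
  rw [key (-2) (-1) 2 1 (by norm_num) (by norm_num),
      key (-2) 1 2 (-1) (by norm_num) (by norm_num),
      key (-1) (-2) 1 2 (by norm_num) (by norm_num),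
      key (-1) 2 1 (-2) (by norm_num) (by norm_num),
      key 1 (-2) (-1) 2 (by norm_num) (by norm_num),
      key 1 2 (-1) (-2) (by norm_num) (by norm_num),
      key 2 (-1) (-2) 1 (by norm_num) (by norm_num),
      key 2 1 (-2) (-1) (by norm_num) (by norm_num)]
  ring

-- B's degree-building comprehension yields exactly the knight list tagged with its damages
lemma pv_build_eq (matrix : List (List String)) :
    (pvKnights matrix).foldl
        (fun d p => d.insert p (pvSumDmg (PySem.Set.ofList (pvKnights matrix)) p.1 p.2))
        PySem.Dict.empty
      = PySem.Dict.mk ((pvKnights matrix).map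
          (fun p => (p, pvSumDmg (pvKnights matrix) p.1 p.2))) := by
  rw [PySem.Set.ofList_eq_self_of_nodup _ (pvKnights_nodup matrix)]
  apply PySem.Dict.ext
  have h := PySem.Dict.items_foldl_insert_fresh (pvKnights matrix) (fun p => p)
    (fun p => pvSumDmg (pvKnights matrix) p.1 p.2) PySem.Dict.empty
    (fun a _ => PySem.Dict.contains_empty a)
    (by simpa using pvKnights_nodup matrix)
  rw [h]
  simp [PySem.Dict.empty]

lemma pv_len_update (matrix : List (List String)) (q : Int × Int) (h1 : 0 ≤ q.1) :
    (PySem.List.pySetD matrix q.1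
      (PySem.List.pySetD (PySem.List.pyGetD matrix q.1 []) q.2 "0")).length = matrix.length := by
  rw [PySem.List.pySetD_of_nonneg _ _ h1, List.length_set]

lemma pv_cell_update_self (matrix : List (List String)) (q : Int × Int)
    (hpre : Pre_get_count_deleted_knights matrix)
    (h1 : 0 ≤ q.1) (h1n : q.1 < (matrix.length : Int))
    (h2 : 0 ≤ q.2) (h2n : q.2 < (matrix.length : Int)) :
    pvCell (PySem.List.pySetD matrix q.1
      (PySem.List.pySetD (PySem.List.pyGetD matrix q.1 []) q.2 "0")) q.1 q.2 = "0" := by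
  have hq1 : q.1.toNat < matrix.length := by omega
  have hrow : matrix.length ≤ matrix[q.1.toNat].length :=
    hpre _ (List.getElem_mem hq1)
  rw [PySem.List.pySetD_of_nonneg _ _ h1,
      PySem.List.pySetD_of_nonneg _ _ h2,
      PySem.List.pyGetD_eq_getElem _ _ h1 (by omega)]
  unfold pvCell
  rw [PySem.List.pyGetD_eq_getElem _ _ h1 (by simp [List.length_set]; omega)]
  rw [List.getElem_set_self (by simpa using hq1)]
  rw [PySem.List.pyGetD_eq_getElem _ _ h2 (by simp [List.length_set]; omega)]
  rw [List.getElem_set_self (by simp [List.length_set]; omega)]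

lemma pv_cell_update_ne (matrix : List (List String)) (q y : Int × Int)
    (hpre : Pre_get_count_deleted_knights matrix)
    (h1 : 0 ≤ q.1) (h1n : q.1 < (matrix.length : Int))
    (h2 : 0 ≤ q.2) (h2n : q.2 < (matrix.length : Int))
    (hy1 : 0 ≤ y.1) (hy1n : y.1 < (matrix.length : Int))
    (hy2 : 0 ≤ y.2) (hy2n : y.2 < (matrix.length : Int))
    (hne : y ≠ q) :
    pvCell (PySem.List.pySetD matrix q.1
      (PySem.List.pySetD (PySem.List.pyGetD matrix q.1 []) q.2 "0")) y.1 y.2 =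
      pvCell matrix y.1 y.2 := by
  have hq1 : q.1.toNat < matrix.length := by omega
  have hrow : matrix.length ≤ matrix[q.1.toNat].length :=
    hpre _ (List.getElem_mem hq1)
  have hyrow : matrix.length ≤ matrix[y.1.toNat].length :=
    hpre _ (List.getElem_mem (by omega))
  rw [PySem.List.pySetD_of_nonneg _ _ h1,
      PySem.List.pySetD_of_nonneg _ _ h2,
      PySem.List.pyGetD_eq_getElem _ _ h1 (by omega)]
  unfold pvCell
  rw [PySem.List.pyGetD_eq_getElem _ _ hy1 (by simp [List.length_set]; omega)]
  rw [PySem.List.pyGetD_eq_getElem _ _ hy1 (by omega)]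
  by_cases hyq : y.1.toNat = q.1.toNat
  · have hy2q : y.2 ≠ q.2 := by
      intro h; exact hne (Prod.ext (by omega) h)
    rw [List.getElem_set, if_pos hyq.symm]
    rw [PySem.List.pyGetD_eq_getElem _ _ hy2 (by simp [List.length_set]; omega),
        PySem.List.pyGetD_eq_getElem _ _ hy2 (by omega)]
    rw [List.getElem_set, if_neg (by omega)]
    congr 2
    omega
  · rw [List.getElem_set, if_neg (by omega)]

lemma pv_pre_update (matrix : List (List String)) (q : Int × Int)
    (hpre : Pre_get_count_deleted_knights matrix)
    (h1 : 0 ≤ q.1) (h1n : q.1 < (matrix.length : Int)) :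
    Pre_get_count_deleted_knights
      (PySem.List.pySetD matrix q.1
        (PySem.List.pySetD (PySem.List.pyGetD matrix q.1 []) q.2 "0")) := by
  intro row hrow
  rw [pv_len_update matrix q h1] at *
  rw [PySem.List.pySetD_of_nonneg _ _ h1] at hrow
  rcases List.mem_or_eq_of_mem_set hrow with h | rfl
  · exact hpre _ h
  · rw [PySem.List.length_pySetD,
      PySem.List.pyGetD_eq_getElem _ _ h1 (by omega)]
    exact hpre _ (List.getElem_mem (by omega))

lemma pv_filter_erase {α : Type} [BEq α] [LawfulBEq α] (l : List α) (p p' : α → Bool) (x : α)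
    (hnd : l.Nodup) (hx : x ∈ l) (hpx : p x = true) (hp'x : p' x = false)
    (hag : ∀ y ∈ l, y ≠ x → p' y = p y) : l.filter p' = (l.filter p).erase x := by
  induction l with
  | nil => cases hx
  | cons a t ih =>
    have hnd' := hnd.of_cons
    have hanot : a ∉ t := (List.nodup_cons.mp hnd).1
    rcases List.mem_cons.mp hx with rfl | hxt
    · rw [List.filter_cons_of_neg (by simp [hp'x]), List.filter_cons_of_pos hpx,
        List.erase_cons_head]
      exact List.filter_congr (fun y hy => hag y (List.mem_cons_of_mem _ hy)
        (fun h => hanot (h ▸ hy)))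
    · have hax : a ≠ x := fun h => hanot (h ▸ hxt)
      have hpa := hag a List.mem_cons_self hax
      have ihr := ih hnd' hxt (fun y hy hne => hag y (List.mem_cons_of_mem _ hy) hne)
      by_cases hp : p a = true
      · rw [List.filter_cons_of_pos (hpa ▸ hp), List.filter_cons_of_pos hp,
          List.erase_cons_tail (by simp [hax]), ihr]
      · rw [List.filter_cons_of_neg (by simp_all), List.filter_cons_of_neg hp, ihr]

lemma pvKnights_update (matrix : List (List String)) (q : Int × Int)
    (hpre : Pre_get_count_deleted_knights matrix)
    (hq : q ∈ pvKnights matrix) :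
    pvKnights (PySem.List.pySetD matrix q.1
      (PySem.List.pySetD (PySem.List.pyGetD matrix q.1 []) q.2 "0")) =
      (pvKnights matrix).erase q := by
  obtain ⟨h1, h1n, h2, h2n, hcell⟩ := (mem_pvKnights matrix q).mp hq
  rw [pvKnights_eq_filter, pvKnights_eq_filter, pv_len_update matrix q h1]
  apply pv_filter_erase _ _ _ q (pvPairs_nodup _)
    ((mem_pvPairs _ q).mpr ⟨h1, h1n, h2, h2n⟩)
  · show (pvCell matrix q.1 q.2 == "K") = true
    simpa using hcell
  · show (pvCell _ q.1 q.2 == "K") = false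
    rw [pv_cell_update_self matrix q hpre h1 h1n h2 h2n]
    rfl
  · intro y hy hne
    obtain ⟨hy1, hy1n, hy2, hy2n⟩ := (mem_pvPairs _ y).mp hy
    show (pvCell _ y.1 y.2 == "K") = (pvCell matrix y.1 y.2 == "K")
    rw [pv_cell_update_ne matrix q y hpre h1 h1n h2 h2n hy1 hy1n hy2 hy2n hne]

lemma pv_sum_nonneg (K : List (Int × Int)) (a b : Int) : 0 ≤ pvSumDmg K a b := by
  unfold pvSumDmg
  rw [PySem.List.foldl_add pvOffsets (fun o : Int × Int =>
      if PySem.Set.contains K (a + o.1, b + o.2) then (1 : Int) else 0) 0]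
  have : ∀ x ∈ pvOffsets.map (fun o =>
      if PySem.Set.contains K (a + o.1, b + o.2) then (1 : Int) else 0), 0 ≤ x := by
    intro x hx
    obtain ⟨o, _, rfl⟩ := List.mem_map.mp hx
    split_ifs <;> omega
  have := List.sum_nonneg this
  omega

lemma pv_loop_eq (fuel : Nat) :
    ∀ (matrix : List (List String)) (pos0 : List Int) (deleted : Int),
      Pre_get_count_deleted_knights matrix →
      pvLoopA fuel matrix pos0 deleted =
        pvLoopB fuel
          (PySem.Dict.mk ((pvKnights matrix).map
            (fun p => (p, pvSumDmg (pvKnights matrix) p.1 p.2)))) deleted := by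
  induction fuel with
  | zero => intro matrix pos0 deleted _; rfl
  | succ fuel ih =>
    intro matrix pos0 deleted hpre
    set K := pvKnights matrix with hKdef
    set f : (Int × Int) → Int := fun p => pvSumDmg K p.1 p.2 with hfdef
    -- the two selection folds
    have hscan : pvScanA matrix pos0 =
        K.foldl (fun st p => if f p > st.1 then (f p, [p.1, p.2]) else st) (0, pos0) := by
      rw [pv_scanA_eq_foldl]
      apply PySem.List.foldl_congr_mem
      intro acc x hx
      obtain ⟨a1, a2, a3, a4, _⟩ := (mem_pvKnights matrix x).mp hx
      show pvStepF matrix acc x = _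
      unfold pvStepF
      rw [pv_damage_eq matrix x.1 x.2 a1 a2 a3 a4]
    have hmax : PySem.List.max?
        ((PySem.Dict.mk (K.map (fun p => (p, f p)))).items) (fun kv => kv.2) =
        K.foldl (fun acc p => match acc with
          | none => some (p, f p)
          | some m => if m.2 < f p then some (p, f p) else some m) none := by
      show PySem.List.max? (K.map (fun p => (p, f p))) (fun kv => kv.2) = _
      unfold PySem.List.max?
      rw [List.foldl_map]
      apply PySem.List.foldl_congr_mem
      intro acc x _
      rcases acc with _ | m <;> rfl
    have hinv : pvSelInv pos0 K f
        (K.foldl (fun st p => if f p > st.1 then (f p, [p.1, p.2]) else st) (0, pos0))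
        (K.foldl (fun acc p => match acc with
          | none => some (p, f p)
          | some m => if m.2 < f p then some (p, f p) else some m) none) := by
      apply pv_sel_rel pos0 K f (fun p _ => pv_sum_nonneg K p.1 p.2) K (fun p h => h)
      show (0, pos0) = (0, pos0)
      rfl
    have lA : pvLoopA (fuel + 1) matrix pos0 deleted =
        (if (pvScanA matrix pos0).1 == 0 then deleted
         else pvLoopA fuel
            (PySem.List.pySetD matrix (PySem.List.pyGetD (pvScanA matrix pos0).2 0 0)
              (PySem.List.pySetD
                (PySem.List.pyGetD matrix (PySem.List.pyGetD (pvScanA matrix pos0).2 0 0) [])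
                (PySem.List.pyGetD (pvScanA matrix pos0).2 1 0) "0"))
            [] (deleted + 1)) := rfl
    have lB : pvLoopB (fuel + 1) (PySem.Dict.mk (K.map (fun p => (p, f p)))) deleted =
        (match PySem.List.max?
            ((PySem.Dict.mk (K.map (fun p => (p, f p)))).items) (fun kv => kv.2) with
         | none => deleted
         | some m =>
           if m.2 == 0 then deleted
           else pvLoopB fuel
              (pvDecr ((PySem.Dict.mk (K.map (fun p => (p, f p)))).erase m.1) m.1.1 m.1.2)
              (deleted + 1)) := rfl
    rw [lA, lB, hmax, hscan]
    rcases hsel : K.foldl (fun acc p => match acc with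
        | none => some (p, f p)
        | some m => if m.2 < f p then some (p, f p) else some m) none with _ | m
    · rw [hsel] at hinv
      rw [hsel]
      have hinv' : (K.foldl (fun st p => if f p > st.1 then (f p, [p.1, p.2]) else st)
          (0, pos0)) = (0, pos0) := hinv
      rw [hinv']
      rfl
    · rw [hsel] at hinv
      rw [hsel]
      dsimp only
      obtain ⟨h1, h2, h3, h4, h5, h6⟩ := hinv
      by_cases h0 : m.2 = 0
      · rw [h0] at h3
        simp only [h3, h0]
        rfl
      · have hpos : 0 < m.2 := by omega
        have hne : (((K.foldl (fun st p => if f p > st.1 then (f p, [p.1, p.2]) else st)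
            (0, pos0)).1 == (0 : Int)) : Bool) = false := by
          simp only [beq_eq_false_iff_ne, ne_eq, h3]
          omega
        have hb0 : ((m.2 == (0 : Int)) : Bool) = false := by simpa using h0
        rw [hne, hb0]
        simp only [Bool.false_eq_true, if_false]
        rw [h5 hpos]
        have e0 : PySem.List.pyGetD [m.1.1, m.1.2] (0 : Int) (0 : Int) = m.1.1 := rfl
        have e1 : PySem.List.pyGetD [m.1.1, m.1.2] (1 : Int) (0 : Int) = m.1.2 := rfl
        rw [e0, e1]
        obtain ⟨b1, b1n, b2, b2n, _⟩ := (mem_pvKnights matrix m.1).mp h1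
        have hKnd : K.Nodup := pvKnights_nodup matrix
        -- B's new dict is the knight map of the updated matrix
        have hdict : pvDecr ((PySem.Dict.mk (K.map (fun p => (p, f p)))).erase m.1) m.1.1 m.1.2
            = PySem.Dict.mk ((K.erase m.1).map
                (fun p => (p, pvSumDmg (K.erase m.1) p.1 p.2))) := by
          rw [pv_erase_map K hKnd f m.1]
          unfold pvDecr
          rw [pv_dec_fold pvOffsets (K.erase m.1) (hKnd.erase m.1) f m.1.1 m.1.2]
          congr 1
          apply List.map_congr_left
          intro x hx
          have hs := pv_sum_erase K hKnd m.1 h1 x.1 x.2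
          rw [pv_cnt_symm x m.1] at hs
          have hfx : f x = pvSumDmg K x.1 x.2 := rfl
          rw [Prod.mk.injEq]
          exact ⟨rfl, by omega⟩
        rw [hdict, ← pvKnights_update matrix m.1 hpre h1]
        exact ih _ [] (deleted + 1) (pv_pre_update matrix m.1 hpre b1 b1n)

-- ===== VERDICT (by name: the statement is the Claim_ definition above) =====
theorem get_count_deleted_knights_spec : Claim_equal_get_count_deleted_knights := by
  intro matrix _ hpre
  unfold Spec_get_count_deleted_knights
  show get_count_deleted_knights matrix = get_count_deleted_knights_alt matrix
  have halt : get_count_deleted_knights_alt matrix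
      = pvLoopB (matrix.length * matrix.length + 1)
          ((pvKnights matrix).foldl
            (fun d p => d.insert p (pvSumDmg (PySem.Set.ofList (pvKnights matrix)) p.1 p.2))
            PySem.Dict.empty) 0 := rfl
  rw [halt, pv_build_eq matrix]
  exact pv_loop_eq _ matrix [] 0 hpre
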